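-- pv_equiv track=rewrite | github.com/joshanashakya/dissertation | workspace/dataset/java-python/GeeksForGeeks/2775/A/2.py | encryptString
-- ===== SOURCE A (Python) =====
-- def isVowel(c):
--     return (c == 'a' or c == 'e' or
--             c == 'i' or c == 'o' or
--             c == 'u')
--
-- def encryptString(s, n, k):
--     countVowels = 0
--     countConsonants = 0
--     ans = ""
--
--     # for each substring
--     for l in range(n - k + 1):
--         countVowels = 0
--         countConsonants = 0
--
--         # substring of size k
--         for r in range(l, l + k):
--
--             # counting number of vowels
--             # and consonants
--             if (isVowel(s[r]) == True):
--                 countVowels += 1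
--             else:
--                 countConsonants += 1
--
--         # append product to answer
--         ans += (str)(countVowels *
--                      countConsonants)
--     return ans
-- ===== SOURCE B (Python) =====
-- def encryptString(s, n, k):
--     m = n - k + 1
--     if m <= 0:
--         return ""
--     if k <= 0:
--         return "0" * m
--     vowels = set("aeiou")
--     v = sum(1 for c in s[:k] if c in vowels)
--     out = [str(v * (k - v))]
--     for l in range(1, m):
--         v += (s[l + k - 1] in vowels) - (s[l - 1] in vowels)
--         out.append(str(v * (k - v)))
--     return "".join(out)
-- ===== Notes on version B (the rewrite author's own statement) =====
-- stated objective: alternative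
-- what changed: Replaces A's per-window rescan of all k characters with a sliding window that updates the vowel count by one add/subtract per shift (consonants = k - vowels), collecting digit pieces in a list joined once.
import Mathlib
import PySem

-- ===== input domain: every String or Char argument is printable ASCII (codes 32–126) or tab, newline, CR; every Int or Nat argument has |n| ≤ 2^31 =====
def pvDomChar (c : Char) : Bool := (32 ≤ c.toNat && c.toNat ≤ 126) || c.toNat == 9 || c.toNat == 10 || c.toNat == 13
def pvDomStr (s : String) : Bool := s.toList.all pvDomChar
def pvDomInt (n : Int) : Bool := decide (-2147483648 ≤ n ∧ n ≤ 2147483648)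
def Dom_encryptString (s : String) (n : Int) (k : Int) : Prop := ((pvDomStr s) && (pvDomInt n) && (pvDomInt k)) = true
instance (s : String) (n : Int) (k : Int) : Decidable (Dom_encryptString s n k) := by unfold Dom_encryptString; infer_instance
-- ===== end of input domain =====

-- B replaces A's per-window rescan by a sliding window that updates the vowel count incrementally.

-- ===== PORT A =====
def isVowelA (c : Char) : Bool :=
  c == 'a' || c == 'e' || c == 'i' || c == 'o' || c == 'u'

-- literal port of A: for each l in range(n-k+1), rescan the window s[l:l+k];
-- an out-of-range s[r] (IndexError in Python) is excluded by Pre_encryptString.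
def encryptString (s : String) (n : Int) (k : Int) : String :=
  String.ofList ((PySem.List.pyRange 0 (n - k + 1) 1).foldl (fun ans l =>
    let cnt := (PySem.List.pyRange l (l + k) 1).foldl
      (fun (cv : Int × Int) r =>
        if isVowelA (PySem.List.pyGetD s.toList r ' ') then (cv.1 + 1, cv.2)
        else (cv.1, cv.2 + 1))
      ((0 : Int), (0 : Int))
    ans ++ PySem.Int.toChars (cnt.1 * cnt.2)) [])

-- ===== PORT B =====
def vowelSetB : PySem.Set Char := PySem.Set.ofList ['a', 'e', 'i', 'o', 'u']

-- port of Source B: sliding window; an out-of-range s[…] (IndexError) is excluded by Pre_encryptString.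
def encryptString_alt (s : String) (n : Int) (k : Int) : String :=
  let m := n - k + 1
  if m ≤ 0 then ""
  else if k ≤ 0 then String.ofList (List.replicate m.toNat '0')
  else
    let cs := s.toList
    let v0 : Int := ((PySem.List.slice cs none (some k)).countP
      (fun c => PySem.Set.contains vowelSetB c) : Nat)
    let st := (PySem.List.pyRange 1 m 1).foldl
      (fun (st : Int × List (List Char)) l =>
        let v := st.1
          + (if PySem.Set.contains vowelSetB (PySem.List.pyGetD cs (l + k - 1) ' ') then 1 else 0)
          - (if PySem.Set.contains vowelSetB (PySem.List.pyGetD cs (l - 1) ' ') then 1 else 0)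
        (v, st.2 ++ [PySem.Int.toChars (v * (k - v))]))
      (v0, [PySem.Int.toChars (v0 * (k - v0))])
    String.ofList (PySem.Chars.join [] st.2)

-- ===== PRECONDITION & SPEC =====
-- A raises IndexError exactly when 1 ≤ k ≤ n and n exceeds len(s); only those inputs are excluded.
def Pre_encryptString (s : String) (n : Int) (k : Int) : Prop :=
  1 ≤ k → k ≤ n → n ≤ (s.toList.length : Int)
instance (s : String) (n : Int) (k : Int) : Decidable (Pre_encryptString s n k) := by
  unfold Pre_encryptString; infer_instance

def pvWitness_encryptString : String × Int × Int := ("geeksforgeeks", 13, 4)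

def Spec_encryptString (s : String) (n : Int) (k : Int) (out : String) : Prop := out = encryptString_alt s n k
instance (s : String) (n : Int) (k : Int) (out : String) : Decidable (Spec_encryptString s n k out) := by unfold Spec_encryptString; infer_instance

-- ===== CLAIM (what is proved, stated in full; the proofs are below) =====
def Claim_equal_encryptString : Prop := ∀ (s : String) (n : Int) (k : Int), Dom_encryptString s n k → Pre_encryptString s n k → Spec_encryptString s n k (encryptString s n k)

-- ===== LEMMAS AND PROOFS =====

-- number of vowels in the size-kN window of cs starting at i
def wcN (cs : List Char) (kN i : Nat) : Nat := ((cs.drop i).take kN).countP (fun c => isVowelA c)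

-- the digits appended for window i
def pieceF (cs : List Char) (kN i : Nat) : List Char :=
  PySem.Int.toChars ((wcN cs kN i : Int) * ((kN : Int) - (wcN cs kN i)))

theorem vow_eq (c : Char) : PySem.Set.contains vowelSetB c = isVowelA c := by
  simp [vowelSetB, isVowelA, PySem.Set.ofList, PySem.Set.contains, Bool.or_assoc]
  rfl

theorem joinNil (l : List (List Char)) : PySem.Chars.join [] l = l.flatten := by
  induction l with
  | nil => rfl
  | cons a t ih =>
    cases t with
    | nil => simp [PySem.Chars.join, List.intercalate]
    | cons b t2 =>
      simp only [PySem.Chars.join, List.intercalate, List.intersperse_cons₂,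
        List.flatten_cons] at *
      simp [ih]

theorem constFlat (L : List Int) :
    (L.map (fun _ => ['0'])).flatten = List.replicate L.length '0' := by
  induction L with
  | nil => rfl
  | cons a t ih => simp [List.replicate_succ]

-- A's inner loop counts vowels/consonants of the window by rescanning
theorem innerA (cs : List Char) (d : Nat) : ∀ (a v c : Int), 0 ≤ a → a + d ≤ (cs.length : Int) →
    (PySem.List.pyRange a (a + d) 1).foldl
      (fun (cv : Int × Int) r =>
        if isVowelA (PySem.List.pyGetD cs r ' ') then (cv.1 + 1, cv.2) else (cv.1, cv.2 + 1))
      (v, c)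
    = (v + (((cs.drop a.toNat).take d).countP (fun x => isVowelA x) : Int),
       c + ((d : Int) - (((cs.drop a.toNat).take d).countP (fun x => isVowelA x) : Int))) := by
  induction d with
  | zero =>
    intro a v c h0 h1
    simp [PySem.List.pyRange_one_eq_nil (le_refl a)]
  | succ d ih =>
    intro a v c h0 h1
    have hlt : a < a + ((d : Nat) + 1 : Nat) := by push_cast; omega
    rw [PySem.List.pyRange_one_cons hlt]
    have haN : a.toNat < cs.length := by omega
    have hget : PySem.List.pyGetD cs a ' ' = cs[a.toNat] :=
      PySem.List.pyGetD_eq_getElem cs ' ' h0 (by omega)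
    have hdrop : cs.drop a.toNat = cs[a.toNat] :: cs.drop (a.toNat + 1) :=
      List.drop_eq_getElem_cons haN
    have hrange : PySem.List.pyRange (a + 1) (a + ((d : Nat) + 1 : Nat)) 1
        = PySem.List.pyRange (a + 1) ((a + 1) + (d : Nat)) 1 := by
      congr 1; push_cast; ring
    have htoNat : (a + 1).toNat = a.toNat + 1 := by omega
    have ih' := fun v c => ih (a + 1) v c (by omega) (by push_cast at h1 ⊢; omega)
    rw [htoNat] at ih'
    by_cases hv : isVowelA cs[a.toNat]
    · simp only [List.foldl_cons, hget, hv, hrange, ih', hdrop, List.take_succ_cons,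
        List.countP_cons, if_true, Prod.mk.injEq]
      constructor <;> (push_cast; ring)
    · simp only [List.foldl_cons, hget, hv, hrange, ih', hdrop, List.take_succ_cons,
        List.countP_cons, Bool.false_eq_true, if_false, Prod.mk.injEq]
      constructor <;> (push_cast; ring)

-- A's result, in closed form: the concatenation of the per-window pieces
theorem A_eq (s : String) (n k : Int) (hk : 1 ≤ k) (hn : n ≤ (s.toList.length : Int)) :
    encryptString s n k
    = String.ofList (((List.range (n - k + 1).toNat).map
        (fun j => pieceF s.toList k.toNat j)).flatten) := by
  unfold encryptString
  simp only [PySem.List.foldl_append_eq_flatMap, List.nil_append]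
  congr 1
  rw [PySem.List.pyRange_one 0 (n - k + 1), List.flatMap_map, List.flatMap_def]
  congr 1
  rw [show n - k + 1 - 0 = n - k + 1 by ring]
  apply List.map_congr_left
  intro j hj
  have hj' : (j : Int) ≤ n - k := by
    have := List.mem_range.mp hj
    omega
  have hkN : ((k.toNat : Nat) : Int) = k := Int.toNat_of_nonneg (by omega)
  have hend : (0 : Int) + (j : Int) + k = ((0 : Int) + (j : Int)) + (k.toNat : Nat) := by
    rw [hkN]
  have := innerA s.toList k.toNat ((0 : Int) + (j : Int)) 0 0 (by omega)
    (by omega)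
  simp only [hend, this]
  simp [pieceF, wcN]

-- sliding-window identity: moving the window one step right adjusts the vowel count
theorem slide (cs : List Char) (kN j : Nat) (hj : j + kN < cs.length) :
    (wcN cs kN (j + 1) : Int)
    = (wcN cs kN j : Int)
      + (if isVowelA (cs[j + kN]'hj) then 1 else 0)
      - (if isVowelA (cs[j]'(by omega)) then 1 else 0) := by
  have hjlen : j < cs.length := by omega
  have h1 : (cs.drop j).take (kN + 1)
      = cs[j] :: (cs.drop (j + 1)).take kN := by
    rw [List.drop_eq_getElem_cons hjlen, List.take_succ_cons]
  have h2 : (cs.drop j).take (kN + 1)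
      = (cs.drop j).take kN ++ [cs[j + kN]'hj] := by
    rw [List.take_add_one, List.getElem?_drop]
    simp [List.getElem?_eq_getElem hj]
  have e1 : ((cs.drop j).take (kN + 1)).countP (fun c => isVowelA c)
      = (if isVowelA cs[j] then 1 else 0) + wcN cs kN (j + 1) := by
    rw [h1, List.countP_cons]
    unfold wcN
    by_cases hv : isVowelA cs[j] <;> simp [hv, Nat.add_comm]
  have e2 : ((cs.drop j).take (kN + 1)).countP (fun c => isVowelA c)
      = wcN cs kN j + (if isVowelA (cs[j + kN]'hj) then 1 else 0) := by
    rw [h2, List.countP_append, List.countP_cons]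
    unfold wcN
    by_cases hv : isVowelA (cs[j + kN]'hj) <;> simp [hv]
  rw [e1] at e2
  by_cases hv1 : isVowelA (cs[j + kN]'hj) <;> by_cases hv2 : isVowelA cs[j] <;>
    simp [hv1, hv2] at e2 ⊢ <;> omega

-- B's loop invariant: after the windows 1..jN the accumulator holds window jN's
-- vowel count and the pieces of windows 1..jN have been appended
theorem loopB (s : String) (n k : Int) (hk : 1 ≤ k) (hn : n ≤ (s.toList.length : Int))
    (out0 : List (List Char)) :
    ∀ (jN : Nat), (jN : Int) ≤ n - k →
    (PySem.List.pyRange 1 (1 + (jN : Int)) 1).foldl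
      (fun (st : Int × List (List Char)) l =>
        ((st.1 + if isVowelA (PySem.List.pyGetD s.toList (l + k - 1) ' ') then 1 else 0)
           - if isVowelA (PySem.List.pyGetD s.toList (l - 1) ' ') then 1 else 0,
         st.2 ++ [PySem.Int.toChars
           (((st.1 + if isVowelA (PySem.List.pyGetD s.toList (l + k - 1) ' ') then 1 else 0)
              - if isVowelA (PySem.List.pyGetD s.toList (l - 1) ' ') then 1 else 0)
            * (k - ((st.1 + if isVowelA (PySem.List.pyGetD s.toList (l + k - 1) ' ') then 1 else 0)
                    - if isVowelA (PySem.List.pyGetD s.toList (l - 1) ' ') then 1 else 0)))]))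
      ((wcN s.toList k.toNat 0 : Int), out0)
    = ((wcN s.toList k.toNat jN : Int),
       out0 ++ (List.range jN).map (fun i => pieceF s.toList k.toNat (i + 1))) := by
  intro jN
  induction jN with
  | zero =>
    intro _
    simp [PySem.List.pyRange_one_eq_nil (le_refl (1 : Int))]
  | succ jN ih =>
    intro hle
    have hkN : ((k.toNat : Nat) : Int) = k := Int.toNat_of_nonneg (by omega)
    have hsplit : (1 : Int) + ((jN + 1 : Nat) : Int) = (1 + (jN : Int)) + 1 := by push_cast; ring
    rw [hsplit, PySem.List.pyRange_one_succ_right (by omega), List.foldl_append,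
      ih (by push_cast at hle; omega), List.foldl_cons, List.foldl_nil]
    have hidx1 : (1 : Int) + (jN : Int) + k - 1 = ((jN + k.toNat : Nat) : Int) := by
      push_cast [hkN]; ring
    have hidx2 : (1 : Int) + (jN : Int) - 1 = ((jN : Nat) : Int) := by ring
    have hb1 : jN + k.toNat < s.toList.length := by
      push_cast at hle; omega
    have hget1 : PySem.List.pyGetD s.toList ((1 : Int) + (jN : Int) + k - 1) ' '
        = s.toList[jN + k.toNat]'hb1 := by
      rw [hidx1, PySem.List.pyGetD_eq_getElem s.toList ' ' (by omega) (by exact_mod_cast hb1)]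
      congr 1
    have hb2 : jN < s.toList.length := by omega
    have hget2 : PySem.List.pyGetD s.toList ((1 : Int) + (jN : Int) - 1) ' '
        = s.toList[jN]'hb2 := by
      rw [hidx2, PySem.List.pyGetD_eq_getElem s.toList ' ' (by omega) (by exact_mod_cast hb2)]
      congr 1
    have hv : ((wcN s.toList k.toNat jN : Int)
        + if isVowelA (s.toList[jN + k.toNat]'hb1) then 1 else 0)
        - (if isVowelA (s.toList[jN]'hb2) then 1 else 0)
        = (wcN s.toList k.toNat (jN + 1) : Int) := (slide s.toList k.toNat jN hb1).symm
    simp only [hget1, hget2, hv]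
    rw [List.range_succ, List.map_append, List.map_cons, List.map_nil, ← List.append_assoc]
    simp only [Prod.mk.injEq, true_and]
    simp [pieceF, hkN]

-- with k ≤ 0 every window is empty, so A writes one '0' per window
theorem A_zero (s : String) (n k : Int) (hk : k ≤ 0) :
    encryptString s n k = String.ofList (List.replicate (n - k + 1).toNat '0') := by
  unfold encryptString
  simp only [PySem.List.foldl_append_eq_flatMap, List.nil_append]
  congr 1
  rw [List.flatMap_def]
  have hmap := List.map_congr_left (l := PySem.List.pyRange 0 (n - k + 1) 1)
    (g := fun (_ : Int) => ['0'])
    (f := fun l => PySem.Int.toChars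
      (((PySem.List.pyRange l (l + k) 1).foldl
          (fun (cv : Int × Int) r =>
            if isVowelA (PySem.List.pyGetD s.toList r ' ') then (cv.1 + 1, cv.2)
            else (cv.1, cv.2 + 1)) ((0 : Int), (0 : Int))).1 *
       ((PySem.List.pyRange l (l + k) 1).foldl
          (fun (cv : Int × Int) r =>
            if isVowelA (PySem.List.pyGetD s.toList r ' ') then (cv.1 + 1, cv.2)
            else (cv.1, cv.2 + 1)) ((0 : Int), (0 : Int))).2))
    (by
      intro l hl
      simp only [PySem.List.pyRange_one_eq_nil (show l + k ≤ l by omega), List.foldl_nil]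
      rfl)
  rw [hmap, constFlat, PySem.List.length_pyRange_one]
  congr 1
  omega

-- B's result, in the same closed form as A_eq
theorem B_eq (s : String) (n k : Int) (hk : 1 ≤ k) (hm : 0 < n - k + 1)
    (hn : n ≤ (s.toList.length : Int)) :
    encryptString_alt s n k
    = String.ofList (((List.range (n - k + 1).toNat).map
        (fun j => pieceF s.toList k.toNat j)).flatten) := by
  have hkN : ((k.toNat : Nat) : Int) = k := Int.toNat_of_nonneg (by omega)
  simp only [encryptString_alt]
  rw [if_neg (by omega), if_neg (by omega),
    PySem.List.slice_to s.toList (show (0 : Int) ≤ k by omega)]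
  simp only [vow_eq]
  have hw0 : ((s.toList.take k.toNat).countP (fun c => isVowelA c)) = wcN s.toList k.toNat 0 := by
    simp [wcN]
  obtain ⟨mN, hmN⟩ : ∃ mN, (n - k + 1).toNat = mN + 1 := ⟨(n - k + 1).toNat - 1, by omega⟩
  rw [hw0, hmN, show n - k + 1 = 1 + (mN : Int) by omega,
    loopB s n k hk hn _ mN (by omega), joinNil]
  congr 1
  rw [List.range_succ_eq_map]
  simp [pieceF, wcN, hkN, List.map_map, Function.comp_def, Nat.succ_eq_add_one]

theorem encryptString_spec : Claim_equal_encryptString := by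
  intro s n k hdom hpre
  unfold Spec_encryptString
  by_cases hm : n - k + 1 ≤ 0
  · have hA : encryptString s n k = "" := by
      unfold encryptString
      rw [PySem.List.pyRange_one_eq_nil (by omega)]
      rfl
    have hB : encryptString_alt s n k = "" := by
      simp only [encryptString_alt]
      rw [if_pos hm]
    rw [hA, hB]
  · by_cases hk : k ≤ 0
    · have hB : encryptString_alt s n k
          = String.ofList (List.replicate (n - k + 1).toNat '0') := by
        simp only [encryptString_alt]
        rw [if_neg hm, if_pos hk]
      rw [A_zero s n k hk, hB]
    · have hn : n ≤ (s.toList.length : Int) := hpre (by omega) (by omega)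
      rw [A_eq s n k (by omega) hn, B_eq s n k (by omega) (by omega) hn]
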